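-- pv_equiv track=rewrite | github.com/Def4ultxD/web | web/helper.py | time_finder
-- ===== SOURCE A (Python) =====
-- def time_finder(time):
--     time_main = ''
--     if time in [i for i in range(5, 12)]:
--         time_main = 'Доброе утро, '
--     if time in [i for i in range(12, 18)]:
--         time_main = 'Добрый день, '
--     if time in [i for i in range(18, 22)]:
--         time_main = 'Добрый вечер, '
--     if time < 5 or time > 21:
--         time_main = 'Доброй ночи, '
--     return time_main
-- ===== SOURCE B (Python) =====
-- BOUNDS = [5, 12, 18, 22]
-- LABELS = ['Доброй ночи, ', 'Доброе утро, ', 'Добрый день, ',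
--           'Добрый вечер, ', 'Доброй ночи, ']
--
--
-- def time_finder(time):
--     # Binary search for the bucket of `time` among the threshold hours.
--     lo = 0
--     hi = 4
--     while lo < hi:
--         mid = (lo + hi) // 2
--         if BOUNDS[mid] <= time:
--             lo = mid + 1
--         else:
--             hi = mid
--     return LABELS[lo]
-- ===== Notes on version B (the rewrite author's own statement) =====
-- stated objective: alternative
-- what changed: Replaced the three list-comprehension membership scans with a last-write-wins overwrite chain by a hand-written binary search over the threshold hours [5,12,18,22] that selects one of five bucket labels.
import Mathlib
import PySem

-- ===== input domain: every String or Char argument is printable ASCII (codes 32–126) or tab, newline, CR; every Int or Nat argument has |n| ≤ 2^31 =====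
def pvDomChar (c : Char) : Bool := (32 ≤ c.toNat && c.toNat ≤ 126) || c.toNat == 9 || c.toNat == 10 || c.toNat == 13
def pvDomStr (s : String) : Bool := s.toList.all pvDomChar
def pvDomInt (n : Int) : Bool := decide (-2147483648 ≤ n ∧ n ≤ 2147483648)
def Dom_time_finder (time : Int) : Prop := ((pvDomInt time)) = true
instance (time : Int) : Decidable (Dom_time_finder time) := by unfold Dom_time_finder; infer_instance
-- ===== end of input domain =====

-- ===== PORT A =====
-- One line: B replaces A's three range-membership scans plus overwrite chain by a hand-written
-- binary search over the threshold hours [5,12,18,22] into a bucket-label table (alternative).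
def time_finder (time : Int) : String :=
  let time_main := ""
  let time_main := if time ∈ PySem.List.pyRange 5 12 1 then "Доброе утро, " else time_main
  let time_main := if time ∈ PySem.List.pyRange 12 18 1 then "Добрый день, " else time_main
  let time_main := if time ∈ PySem.List.pyRange 18 22 1 then "Добрый вечер, " else time_main
  let time_main := if time < 5 ∨ time > 21 then "Доброй ночи, " else time_main
  time_main

-- ===== PORT B =====
def pvBounds : List Int := [5, 12, 18, 22]
def pvLabels : List String :=
  ["Доброй ночи, ", "Доброе утро, ", "Добрый день, ", "Добрый вечер, ", "Доброй ночи, "]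

-- the `while lo < hi` binary-search loop of Source B, as recursion on the shrinking width hi - lo
def pvBisect (time : Int) (lo hi : Nat) : Nat :=
  if lo < hi then
    let mid := (lo + hi) / 2
    if pvBounds.getD mid 0 ≤ time then pvBisect time (mid + 1) hi
    else pvBisect time lo mid
  else lo
termination_by hi - lo
decreasing_by all_goals omega

def time_finder_alt (time : Int) : String :=
  pvLabels.getD (pvBisect time 0 4) ""

-- ===== PRECONDITION & SPEC =====
def Spec_time_finder (time : Int) (out : String) : Prop := out = time_finder_alt time
instance (time : Int) (out : String) : Decidable (Spec_time_finder time out) := by unfold Spec_time_finder; infer_instance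

-- ===== CLAIM (what is proved, stated in full; the proofs are below) =====
def Claim_equal_time_finder : Prop := ∀ (time : Int), Dom_time_finder time → Spec_time_finder time (time_finder time)

-- ===== LEMMAS AND PROOFS =====
theorem pvBisect_lt5 (time : Int) (h : time < 5) : pvBisect time 0 4 = 0 := by
  rw [pvBisect]; simp only [pvBounds, show ((0+4)/2 : Nat) = 2 by norm_num, List.getD]
  simp [show ¬ (18:Int) ≤ time by omega]
  rw [pvBisect]; simp [pvBounds, show ¬ (12:Int) ≤ time by omega]
  rw [pvBisect]; simp [pvBounds, show ¬ (5:Int) ≤ time by omega, pvBisect]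

theorem pvBisect_gt21 (time : Int) (h : 21 < time) : pvBisect time 0 4 = 4 := by
  rw [pvBisect]; simp [pvBounds, show (18:Int) ≤ time by omega,
    show (22:Int) ≤ time by omega, pvBisect]

-- ===== VERDICT (by name: the statement is the Claim_ definition above) =====
theorem time_finder_spec : Claim_equal_time_finder := by
  intro time hdom
  unfold Spec_time_finder Dom_time_finder pvDomInt at *
  rcases lt_or_ge time 5 with h | h
  · have hn : time < 5 ∨ time > 21 := Or.inl h
    simp only [time_finder, time_finder_alt, if_pos hn, pvBisect_lt5 time h]
    rfl
  · rcases lt_or_ge 21 time with h2 | h2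
    · have hn : time < 5 ∨ time > 21 := Or.inr h2
      simp only [time_finder, time_finder_alt, if_pos hn, pvBisect_gt21 time h2]
      rfl
    · interval_cases time <;> simp [time_finder, time_finder_alt, pvBisect, pvBounds, pvLabels]
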